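-- pv_equiv track=rewrite | github.com/umbrewicz/CS-303E | Project2.py | numLessOrEqualToN
-- ===== SOURCE A (Python) =====
-- def numLessOrEqualToN(n):
--
--     if n < 0:
--         return 0
--
--     elif n == 0:
--         return 1
--
--     elif n == 1:
--         return 3
--
--     else:
--         fib1, fib2 = 1, 1
--         fibs = [0, 1, 1]
--         numLessOrEqual = 3
--
--         for counter in range(0, n):
--
--             fib1, fib2 = fib2, fib1 + fib2
--
--             if fib2 <= n:
--                 fibs.append(fib2)
--                 numLessOrEqual += 1
--
--         return numLessOrEqual
-- ===== SOURCE B (Python) =====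
-- def numLessOrEqualToN(n):
--     if n < 0:
--         return 0
--     if n == 0:
--         return 1
--     count = 1
--     a, b = 1, 1
--     while a <= n:
--         count += 1
--         a, b = b, a + b
--     return count
-- ===== Notes on version B (the rewrite author's own statement) =====
-- stated objective: faster
-- what changed: B generates Fibonacci numbers and stops as soon as one exceeds n, instead of A's loop of n iterations that keeps advancing the sequence after it has passed n.
import Mathlib
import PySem

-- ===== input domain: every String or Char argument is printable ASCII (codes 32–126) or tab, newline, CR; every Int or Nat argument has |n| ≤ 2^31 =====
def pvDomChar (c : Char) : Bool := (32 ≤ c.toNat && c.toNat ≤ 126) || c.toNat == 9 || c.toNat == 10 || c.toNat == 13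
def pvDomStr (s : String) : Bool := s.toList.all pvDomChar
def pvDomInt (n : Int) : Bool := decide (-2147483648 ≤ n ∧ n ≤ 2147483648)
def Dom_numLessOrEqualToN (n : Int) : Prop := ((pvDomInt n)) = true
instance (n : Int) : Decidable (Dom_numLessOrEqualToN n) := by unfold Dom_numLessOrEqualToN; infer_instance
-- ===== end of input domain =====

-- B generates Fibonacci numbers and stops as soon as one exceeds n, instead of A's
-- n-iteration loop that keeps advancing the sequence after it has passed n.

-- ===== PORT A =====
-- state = (fib1, fib2, fibs, numLessOrEqual), exactly the Python loop variables
def pvAStep (n : Int) (st : Int × Int × List Int × Int) (_counter : Int) :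
    Int × Int × List Int × Int :=
  let fib1 := st.2.1
  let fib2 := st.1 + st.2.1
  if fib2 ≤ n then (fib1, fib2, st.2.2.1 ++ [fib2], st.2.2.2 + 1)
  else (fib1, fib2, st.2.2.1, st.2.2.2)

def numLessOrEqualToN (n : Int) : Int :=
  if n < 0 then 0
  else if n = 0 then 1
  else if n = 1 then 3
  else
    ((PySem.List.pyRange 0 n 1).foldl (pvAStep n) (1, 1, [0, 1, 1], 3)).2.2.2

-- ===== PORT B =====
-- the while loop of Source B; the hypotheses 1 ≤ a ≤ b only justify termination
def pvBLoop (n a b cnt : Int) (ha : 1 ≤ a) (hab : a ≤ b) : Int :=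
  if h : a ≤ n then pvBLoop n b (a + b) (cnt + 1) (by omega) (by omega)
  else cnt
termination_by ((n + 1 - a).toNat + (n + 1 - b).toNat)
decreasing_by omega

def numLessOrEqualToN_alt (n : Int) : Int :=
  if n < 0 then 0
  else if n = 0 then 1
  else pvBLoop n 1 1 1 (by norm_num) (by norm_num)

-- ===== PRECONDITION & SPEC =====
def Spec_numLessOrEqualToN (n : Int) (out : Int) : Prop := out = numLessOrEqualToN_alt n
instance (n : Int) (out : Int) : Decidable (Spec_numLessOrEqualToN n out) := by unfold Spec_numLessOrEqualToN; infer_instance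

-- ===== CLAIM (what is proved, stated in full; the proofs are below) =====
def Claim_equal_numLessOrEqualToN : Prop := ∀ (n : Int), Dom_numLessOrEqualToN n → Spec_numLessOrEqualToN n (numLessOrEqualToN n)

-- ===== LEMMAS AND PROOFS =====

theorem pvBLoop_eq (n a b cnt : Int) (ha : 1 ≤ a) (hab : a ≤ b) :
    pvBLoop n a b cnt ha hab =
      if a ≤ n then pvBLoop n b (a + b) (cnt + 1) (by omega) (by omega) else cnt := by
  rw [pvBLoop]
  by_cases h : a ≤ n <;> simp [h]

-- once fib2 would exceed n forever, the A-fold no longer changes the counter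
theorem pvA_dead (n : Int) (l : List Int) :
    ∀ (a b : Int) (fibs : List Int) (c : Int), 1 ≤ a → 1 ≤ b → n < b →
      (l.foldl (pvAStep n) (a, b, fibs, c)).2.2.2 = c := by
  induction l with
  | nil => intro a b fibs c _ _ _; simp
  | cons x xs ih =>
      intro a b fibs c ha hb hn
      simp only [List.foldl_cons, pvAStep]
      rw [if_neg (by omega)]
      exact ih b (a + b) fibs c hb (by omega) (by omega)

-- main alignment: given enough iterations, A's count equals B's loop result
theorem pvA_main (n : Int) (l : List Int) :
    ∀ (a b : Int) (fibs : List Int) (c : Int) (ha : 1 ≤ a) (hab : a ≤ b),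
      n < b + l.length →
      (l.foldl (pvAStep n) (a, b, fibs, c)).2.2.2 =
        pvBLoop n (a + b) (a + 2 * b) c (by omega) (by omega) := by
  induction l with
  | nil =>
      intro a b fibs c ha hab hn
      simp only [List.length_nil] at hn
      simp only [List.foldl_nil]
      rw [pvBLoop_eq, if_neg (by omega)]
  | cons x xs ih =>
      intro a b fibs c ha hab hn
      simp only [List.length_cons] at hn
      simp only [List.foldl_cons, pvAStep]
      by_cases h : a + b ≤ n
      · rw [if_pos h]
        rw [pvBLoop_eq, if_pos h]
        have := ih b (a + b) (fibs ++ [a + b]) (c + 1) (by omega) (by omega)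
          (by omega)
        rw [this]
        congr 1 <;> ring
      · rw [if_neg h]
        rw [pvBLoop_eq, if_neg h]
        exact pvA_dead n xs b (a + b) fibs c (by omega) (by omega) (by omega)

-- ===== VERDICT (by name: the statement is the Claim_ definition above) =====
theorem numLessOrEqualToN_spec : Claim_equal_numLessOrEqualToN := by
  intro n _
  unfold Spec_numLessOrEqualToN numLessOrEqualToN numLessOrEqualToN_alt
  by_cases h0 : n < 0
  · simp [h0]
  · rw [if_neg h0, if_neg h0]
    by_cases h1 : n = 0
    · simp [h1]
    · rw [if_neg h1, if_neg h1]
      have hB : pvBLoop n 1 1 1 (by norm_num) (by norm_num) =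
          pvBLoop n 2 3 3 (by norm_num) (by norm_num) := by
        rw [pvBLoop_eq, if_pos (by omega), pvBLoop_eq, if_pos (by omega)]
        norm_num
      by_cases h2 : n = 1
      · rw [if_pos h2, hB]
        subst h2
        rw [pvBLoop_eq, if_neg (by norm_num)]
      · rw [if_neg h2, hB]
        have hlen : ((PySem.List.pyRange 0 n 1).length : Int) = n := by
          rw [PySem.List.length_pyRange_one]; omega
        have := pvA_main n (PySem.List.pyRange 0 n 1) 1 1 [0, 1, 1] 3
          (by norm_num) (by norm_num) (by omega)
        rw [this]
        norm_num
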